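-- pv_equiv track=rewrite | github.com/pers5not/my_rep | problem_solving/password_generator.py | clean_user_choice
-- ===== SOURCE A (Python) =====
-- def clean_user_choice(user_list):
--     user_choice = []
--     for choice in user_list:
--         choice = int(choice)
--         if choice not in user_choice and choice > 0 and choice <= 5:
--             user_choice.append(int(choice))
--         else:
--             continue
--     return user_choice
-- ===== SOURCE B (Python) =====
-- def clean_user_choice(user_list):
--     # Scan the fixed value domain 1..5: keep candidates present in the input,
--     # ordered by first occurrence (sort by first index).
--     xs = [int(x) for x in user_list]
--     return sorted((v for v in range(1, 6) if v in xs), key=xs.index)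
-- ===== Notes on version B (the rewrite author's own statement) =====
-- stated objective: alternative
-- what changed: B inverts the iteration: instead of A's single pass over the input with a growing-result membership test, B scans the fixed candidate domain 1..5 for values present in the input and sorts the survivors by first-occurrence index.
import Mathlib
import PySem

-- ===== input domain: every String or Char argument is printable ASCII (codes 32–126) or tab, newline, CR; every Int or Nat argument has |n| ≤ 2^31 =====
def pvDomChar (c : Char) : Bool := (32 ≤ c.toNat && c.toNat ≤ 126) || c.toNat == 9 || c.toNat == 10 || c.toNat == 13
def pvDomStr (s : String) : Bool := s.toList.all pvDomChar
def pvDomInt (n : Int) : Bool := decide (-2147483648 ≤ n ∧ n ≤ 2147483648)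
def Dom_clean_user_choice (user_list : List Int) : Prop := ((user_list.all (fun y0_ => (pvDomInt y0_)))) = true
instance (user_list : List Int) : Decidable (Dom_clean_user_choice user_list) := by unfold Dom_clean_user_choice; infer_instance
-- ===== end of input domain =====

-- B flips the iteration: instead of A's single pass over the input with a growing-list
-- membership test, B scans the fixed value domain 1..5 for values present in the input
-- and orders them by first-occurrence index (alternative decomposition, same cost).

-- ===== PORT A =====
def clean_user_choice (user_list : List Int) : List Int :=
  -- int(choice) on an int is the identity
  user_list.foldl
    (fun user_choice choice =>
      if choice ∉ user_choice ∧ choice > 0 ∧ choice ≤ 5 then user_choice ++ [choice]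
      else user_choice)
    []

-- ===== PORT B =====
def clean_user_choice_alt (user_list : List Int) : List Int :=
  -- xs = [int(x) for x in user_list]  (identity on ints)
  -- sorted((v for v in range(1, 6) if v in xs), key=xs.index)
  -- xs.index v never raises here (v ∈ xs by the filter), so the key is index?.getD 0
  let xs := user_list
  PySem.List.sorted
    ((PySem.List.pyRange 1 6 1).filter (fun v => decide (v ∈ xs)))
    (fun v => (PySem.List.index? xs v).getD 0) false

-- ===== PRECONDITION & SPEC =====
def Spec_clean_user_choice (user_list : List Int) (out : List Int) : Prop := out = clean_user_choice_alt user_list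
instance (user_list : List Int) (out : List Int) : Decidable (Spec_clean_user_choice user_list out) := by unfold Spec_clean_user_choice; infer_instance

-- ===== CLAIM (what is proved, stated in full; the proofs are below) =====
def Claim_equal_clean_user_choice : Prop := ∀ (user_list : List Int), Dom_clean_user_choice user_list → Spec_clean_user_choice user_list (clean_user_choice user_list)

-- ===== LEMMAS AND PROOFS =====

-- A's loop accumulator is the range-filter of the ordered dedup of the processed prefix.
theorem clean_user_choice_key (l seen : List Int) :
    l.foldl
      (fun user_choice choice =>
        if choice ∉ user_choice ∧ choice > 0 ∧ choice ≤ 5 then user_choice ++ [choice]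
        else user_choice)
      (seen.filter (fun c => decide (0 < c ∧ c ≤ 5)))
    = (l.foldl PySem.Set.add seen).filter (fun c => decide (0 < c ∧ c ≤ 5)) := by
  induction l generalizing seen with
  | nil => rfl
  | cons x xs ih =>
    simp only [List.foldl]
    by_cases hx : x ∈ seen
    · have hadd : PySem.Set.add seen x = seen := by simp [PySem.Set.add, PySem.Set.contains, hx]
      rw [hadd]
      by_cases hr : x > 0 ∧ x ≤ 5
      · have : x ∈ seen.filter (fun c => decide (0 < c ∧ c ≤ 5)) := by
          refine List.mem_filter.mpr ⟨hx, ?_⟩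
          simpa using And.intro hr.1 hr.2
        rw [if_neg (by tauto)]
        exact ih seen
      · rw [if_neg (by tauto)]
        exact ih seen
    · have hadd : PySem.Set.add seen x = seen ++ [x] := by
        simp [PySem.Set.add, PySem.Set.contains, hx]
      rw [hadd]
      by_cases hr : x > 0 ∧ x ≤ 5
      · have hnm : x ∉ seen.filter (fun c => decide (0 < c ∧ c ≤ 5)) := by
          intro h; exact hx (List.mem_filter.mp h).1
        rw [if_pos ⟨hnm, hr⟩]
        have : (seen ++ [x]).filter (fun c => decide (0 < c ∧ c ≤ 5))
            = seen.filter (fun c => decide (0 < c ∧ c ≤ 5)) ++ [x] := by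
          rw [List.filter_append]; simp [hr.1, hr.2]
        rw [← this]
        exact ih (seen ++ [x])
      · rw [if_neg (by tauto)]
        have : (seen ++ [x]).filter (fun c => decide (0 < c ∧ c ≤ 5))
            = seen.filter (fun c => decide (0 < c ∧ c ≤ 5)) := by
          rw [List.filter_append]
          have : ¬ (0 < x ∧ x ≤ 5) := by tauto
          simp [this]
        rw [← this]
        exact ih (seen ++ [x])

-- foldl Set.add with any accumulator, in terms of the empty-accumulator run
theorem foldl_add_seen (t : List Int) : ∀ s : List Int,
    t.foldl PySem.Set.add s = s ++ (t.foldl PySem.Set.add []).filter (fun y => decide (y ∉ s)) := by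
  induction t with
  | nil => intro s; simp
  | cons y t' ih =>
    intro s
    simp only [List.foldl]
    rw [ih (PySem.Set.add s y), ih (PySem.Set.add [] y)]
    have hadd0 : PySem.Set.add ([] : List Int) y = [y] := by
      simp [PySem.Set.add, PySem.Set.contains]
    rw [hadd0, List.filter_append, List.filter_filter]
    by_cases hy : y ∈ s
    · have hadd : PySem.Set.add s y = s := by
        simp [PySem.Set.add, PySem.Set.contains, hy]
      rw [hadd]
      have hfy : ([y] : List Int).filter (fun x => decide (x ∉ s)) = [] := by
        simp [hy]
      rw [hfy]
      have : ∀ x ∈ t'.foldl PySem.Set.add ([] : List Int),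
          (decide (x ∉ s) && decide (x ∉ ([y] : List Int))) = decide (x ∉ s) := by
        intro x _
        by_cases hx : x ∈ s
        · simp [hx]
        · have : x ≠ y := fun h => hx (h ▸ hy)
          simp [hx, this]
      rw [List.filter_congr this]
      simp
    · have hadd : PySem.Set.add s y = s ++ [y] := by
        simp [PySem.Set.add, PySem.Set.contains, hy]
      rw [hadd]
      have hfy : ([y] : List Int).filter (fun x => decide (x ∉ s)) = [y] := by
        simp [hy]
      rw [hfy]
      have : ∀ x ∈ t'.foldl PySem.Set.add ([] : List Int),
          (decide (x ∉ s) && decide (x ∉ ([y] : List Int))) = decide (x ∉ s ++ [y]) := by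
        intro x _
        by_cases hx : x ∈ s <;> by_cases hxy : x = y <;> simp [hx, hxy]
      rw [List.filter_congr this]
      simp

-- dedup of a cons, structurally
theorem dedup_cons (x : Int) (t : List Int) :
    PySem.List.dedup (x :: t) = x :: (PySem.List.dedup t).filter (fun y => decide (y ≠ x)) := by
  have h1 : PySem.List.dedup (x :: t) = (x :: t).foldl PySem.Set.add [] := by
    rw [PySem.List.dedup_eq_ofList, PySem.Set.ofList_eq_foldl]
  have h2 : PySem.List.dedup t = t.foldl PySem.Set.add [] := by
    rw [PySem.List.dedup_eq_ofList, PySem.Set.ofList_eq_foldl]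
  rw [h1]
  simp only [List.foldl]
  have hadd0 : PySem.Set.add ([] : List Int) x = [x] := by
    simp [PySem.Set.add, PySem.Set.contains]
  rw [hadd0, foldl_add_seen t [x], ← h2]
  have : ∀ y ∈ PySem.List.dedup t, (decide (y ∉ ([x] : List Int))) = decide (y ≠ x) := by
    intro y _; simp
  rw [List.filter_congr this]
  simp

-- the ordered dedup is pairwise-increasing in first-occurrence index
theorem dedup_pairwise_index (xs : List Int) :
    (PySem.List.dedup xs).Pairwise
      (fun a b => (PySem.List.index? xs a).getD 0 < (PySem.List.index? xs b).getD 0) := by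
  induction xs with
  | nil =>
    have : PySem.List.dedup ([] : List Int) = [] := by decide
    rw [this]; exact List.Pairwise.nil
  | cons x t ih =>
    rw [dedup_cons]
    refine List.Pairwise.cons ?_ ?_
    · intro b hb
      have hbf := List.mem_filter.mp hb
      have hbne : b ≠ x := by simpa using hbf.2
      have hbt : b ∈ t := (PySem.List.mem_dedup t b).mp hbf.1
      obtain ⟨i, hi⟩ := Option.isSome_iff_exists.mp ((PySem.List.index?_isSome_iff t b).mpr hbt)
      have hx0 : PySem.List.index? (x :: t) x = some 0 := PySem.List.index?_cons_self x t
      have hbx : PySem.List.index? (x :: t) b = (PySem.List.index? t b).map (· + 1) :=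
        PySem.List.index?_cons_of_ne t (Ne.symm hbne)
      rw [hx0, hbx, hi]
      simp
    · have hfil : ((PySem.List.dedup t).filter (fun y => decide (y ≠ x))).Pairwise
          (fun a b => (PySem.List.index? t a).getD 0 < (PySem.List.index? t b).getD 0) :=
        List.Pairwise.filter _ ih
      refine hfil.imp_of_mem ?_
      intro a b ha hb hab
      have hane : a ≠ x := by simpa using (List.mem_filter.mp ha).2
      have hbne : b ≠ x := by simpa using (List.mem_filter.mp hb).2
      have hat : a ∈ t := (PySem.List.mem_dedup t a).mp (List.mem_filter.mp ha).1
      have hbt : b ∈ t := (PySem.List.mem_dedup t b).mp (List.mem_filter.mp hb).1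
      obtain ⟨i, hi⟩ := Option.isSome_iff_exists.mp ((PySem.List.index?_isSome_iff t a).mpr hat)
      obtain ⟨j, hj⟩ := Option.isSome_iff_exists.mp ((PySem.List.index?_isSome_iff t b).mpr hbt)
      have hax : PySem.List.index? (x :: t) a = (PySem.List.index? t a).map (· + 1) :=
        PySem.List.index?_cons_of_ne t (Ne.symm hane)
      have hbx : PySem.List.index? (x :: t) b = (PySem.List.index? t b).map (· + 1) :=
        PySem.List.index?_cons_of_ne t (Ne.symm hbne)
      rw [hax, hbx, hi, hj]
      rw [hi, hj] at hab
      simpa using Nat.add_lt_add_right (by simpa using hab) 1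

-- ===== VERDICT (by name: the statement is the Claim_ definition above) =====
theorem clean_user_choice_spec : Claim_equal_clean_user_choice := by
  intro xs _
  unfold Spec_clean_user_choice clean_user_choice clean_user_choice_alt
  -- A's run equals the filtered ordered dedup
  have hA : xs.foldl
      (fun user_choice choice =>
        if choice ∉ user_choice ∧ choice > 0 ∧ choice ≤ 5 then user_choice ++ [choice]
        else user_choice) []
      = (PySem.List.dedup xs).filter (fun c => decide (0 < c ∧ c ≤ 5)) := by
    have := clean_user_choice_key xs []
    simpa [PySem.List.dedup_eq_ofList, PySem.Set.ofList_eq_foldl] using this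
  rw [hA]
  -- B's sort returns exactly that list: it is a permutation of the candidate filter,
  -- strictly ordered by the sort key (first-occurrence index)
  have hpair : ((PySem.List.dedup xs).filter (fun c => decide (0 < c ∧ c ≤ 5))).Pairwise
      (fun a b => (PySem.List.index? xs a).getD 0 < (PySem.List.index? xs b).getD 0) :=
    List.Pairwise.filter _ (dedup_pairwise_index xs)
  have hperm : ((PySem.List.dedup xs).filter (fun c => decide (0 < c ∧ c ≤ 5))).Perm
      ((PySem.List.pyRange 1 6 1).filter (fun v => decide (v ∈ xs))) := by
    have hrange : PySem.List.pyRange 1 6 1 = ([1, 2, 3, 4, 5] : List Int) := by decide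
    refine (List.perm_ext_iff_of_nodup ?_ ?_).mpr ?_
    · exact List.Nodup.filter _ (PySem.List.nodup_dedup xs)
    · rw [hrange]; exact List.Nodup.filter _ (by decide)
    · intro a
      rw [hrange]
      simp only [List.mem_filter, PySem.List.mem_dedup xs a, decide_eq_true_eq]
      constructor
      · rintro ⟨hmem, h1, h2⟩
        refine ⟨?_, hmem⟩
        have : a = 1 ∨ a = 2 ∨ a = 3 ∨ a = 4 ∨ a = 5 := by omega
        rcases this with h | h | h | h | h <;> simp [h]
      · rintro ⟨hr, hmem⟩
        have : a = 1 ∨ a = 2 ∨ a = 3 ∨ a = 4 ∨ a = 5 := by simpa using hr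
        exact ⟨hmem, by omega, by omega⟩
  exact Eq.symm (PySem.List.sorted_eq_of_perm_of_pairwise_lt
    ((PySem.List.pyRange 1 6 1).filter (fun v => decide (v ∈ xs)))
    ((PySem.List.dedup xs).filter (fun c => decide (0 < c ∧ c ≤ 5)))
    (fun v => (PySem.List.index? xs v).getD 0) hperm hpair)
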